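-- pv_equiv track=rewrite | github.com/charsyam/pdf_search | src/suki_helper/search/ranker.py | _adjacency_rank
-- ===== SOURCE A (Python) =====
-- SEPARATOR_CHARACTERS = {" ", "\t", "\n", "\r", "-", "_", "/", ".", ","}
--
-- def _adjacency_rank(
--     original_text: str,
--     token_boundaries: list[tuple[int, int]],
-- ) -> int:
--     if not token_boundaries:
--         return 0
--
--     if len(token_boundaries) == 1:
--         return 3
--
--     gap_segments = [
--         original_text[token_boundaries[index][1] : token_boundaries[index + 1][0]]
--         for index in range(len(token_boundaries) - 1)
--     ]
--     if all(segment == "" for segment in gap_segments):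
--         return 4
--     if all(segment and _is_punctuation_only(segment) for segment in gap_segments):
--         return 3
--     if all(segment and segment.isspace() for segment in gap_segments):
--         return 2
--     return 1
--
-- def _is_punctuation_only(text: str) -> bool:
--     return all(
--         (not character.isalnum())
--         and (not character.isspace())
--         and character in SEPARATOR_CHARACTERS
--         for character in text
--     )
-- ===== SOURCE B (Python) =====
-- SEPARATOR_CHARACTERS = {" ", "\t", "\n", "\r", "-", "_", "/", ".", ","}
--
--
-- def _adjacency_rank(
--     original_text: str,
--     token_boundaries: list[tuple[int, int]],
-- ) -> int:
--     if not token_boundaries: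
--         return 0
--     if len(token_boundaries) == 1:
--         return 3
--
--     labels = set()
--     for (_, end), (start, _) in zip(token_boundaries, token_boundaries[1:]):
--         gap = original_text[end:start]
--         if gap == "":
--             labels.add("empty")
--         elif all(
--             (not c.isalnum()) and (not c.isspace()) and c in SEPARATOR_CHARACTERS
--             for c in gap
--         ):
--             labels.add("punct")
--         elif gap.isspace():
--             labels.add("space")
--         else:
--             labels.add("other")
--
--     if labels == {"empty"}:
--         return 4
--     if labels == {"punct"}:
--         return 3
--     if labels == {"space"}:
--         return 2
--     return 1
-- ===== Notes on version B (the rewrite author's own statement) =====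
-- stated objective: simpler
-- what changed: Instead of materialising the gap list and running three separate all() passes (each rebuilding the punctuation/space checks), B classifies each consecutive gap once into one of four disjoint labels in a single zip loop and decides the rank from the resulting label set.
import Mathlib
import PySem

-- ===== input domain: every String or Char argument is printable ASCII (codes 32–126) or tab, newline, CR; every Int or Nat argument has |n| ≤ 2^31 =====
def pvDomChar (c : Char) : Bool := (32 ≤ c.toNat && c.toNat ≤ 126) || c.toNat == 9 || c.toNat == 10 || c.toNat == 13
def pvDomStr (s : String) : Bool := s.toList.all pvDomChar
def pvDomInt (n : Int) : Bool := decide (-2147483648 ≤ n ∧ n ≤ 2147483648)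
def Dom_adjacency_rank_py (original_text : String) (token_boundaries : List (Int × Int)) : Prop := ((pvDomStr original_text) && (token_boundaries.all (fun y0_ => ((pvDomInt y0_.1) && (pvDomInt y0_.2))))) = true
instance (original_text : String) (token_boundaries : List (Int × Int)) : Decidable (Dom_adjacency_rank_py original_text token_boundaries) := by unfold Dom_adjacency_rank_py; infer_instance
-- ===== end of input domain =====

-- B replaces A's gap list plus three all() passes by one zip loop that classifies each gap
-- into a disjoint label and decides the rank from the label set (objective: simpler).


-- ===== PORT A =====
def pvSepChars : List Char := [' ', '\t', '\n', '\r', '-', '_', '/', '.', ',']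

-- _is_punctuation_only
def pvIsPunctuationOnly (text : List Char) : Bool :=
  text.all (fun character =>
    !PySem.Chars.isalnum character && !PySem.Chars.isspace character
      && pvSepChars.contains character)

def adjacency_rank_py (original_text : String) (token_boundaries : List (Int × Int)) : Int :=
  if token_boundaries = [] then 0
  else if token_boundaries.length = 1 then 3
  else
    let gap_segments : List (List Char) :=
      (List.range (token_boundaries.length - 1)).map (fun (index : Nat) =>
        PySem.List.slice original_text.toList
          (some (PySem.List.pyGetD token_boundaries (index : Int) (0, 0)).2)
          (some (PySem.List.pyGetD token_boundaries ((index : Int) + 1) (0, 0)).1))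
    if gap_segments.all (fun segment => segment.isEmpty) then 4
    else if gap_segments.all (fun segment => !segment.isEmpty && pvIsPunctuationOnly segment) then 3
    else if gap_segments.all (fun segment => !segment.isEmpty && PySem.Chars.strIsspace segment) then 2
    else 1

-- ===== PORT B =====
def pvLabel (gap : List Char) : String :=
  if gap.isEmpty then "empty"
  else if gap.all (fun c =>
      !PySem.Chars.isalnum c && !PySem.Chars.isspace c && pvSepChars.contains c) then "punct"
  else if PySem.Chars.strIsspace gap then "space"
  else "other"

def adjacency_rank_py_alt (original_text : String) (token_boundaries : List (Int × Int)) : Int :=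
  if token_boundaries = [] then 0
  else if token_boundaries.length = 1 then 3
  else
    let labels : PySem.Set String :=
      (token_boundaries.zip token_boundaries.tail).foldl
        (fun labels p =>
          PySem.Set.add labels
            (pvLabel (PySem.List.slice original_text.toList (some p.1.2) (some p.2.1))))
        PySem.Set.empty
    if PySem.Set.equal labels ["empty"] then 4
    else if PySem.Set.equal labels ["punct"] then 3
    else if PySem.Set.equal labels ["space"] then 2
    else 1

-- ===== PRECONDITION & SPEC =====
def Spec_adjacency_rank_py (original_text : String) (token_boundaries : List (Int × Int)) (out : Int) : Prop := out = adjacency_rank_py_alt original_text token_boundaries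
instance (original_text : String) (token_boundaries : List (Int × Int)) (out : Int) : Decidable (Spec_adjacency_rank_py original_text token_boundaries out) := by unfold Spec_adjacency_rank_py; infer_instance

-- ===== CLAIM (what is proved, stated in full; the proofs are below) =====
def Claim_equal_adjacency_rank_py : Prop := ∀ (original_text : String) (token_boundaries : List (Int × Int)), Dom_adjacency_rank_py original_text token_boundaries → Spec_adjacency_rank_py original_text token_boundaries (adjacency_rank_py original_text token_boundaries)

-- ===== LEMMAS AND PROOFS =====

-- A's indexed comprehension over range(len-1) builds exactly the gaps of B's zip over adjacent pairs.
theorem pv_gaps_eq (cs : List Char) (tb : List (Int × Int)) :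
    (List.range (tb.length - 1)).map (fun (index : Nat) =>
        PySem.List.slice cs
          (some (PySem.List.pyGetD tb (index : Int) (0, 0)).2)
          (some (PySem.List.pyGetD tb ((index : Int) + 1) (0, 0)).1))
      = (tb.zip tb.tail).map (fun p =>
          PySem.List.slice cs (some p.1.2) (some p.2.1)) := by
  apply List.ext_getElem
  · simp only [List.length_map, List.length_zip, List.length_tail, List.length_range]
    omega
  · intro k h1 h2
    have hk : k < tb.length - 1 := by simpa using h1
    have hk1 : k + 1 < tb.length := by omega
    have e1 : PySem.List.pyGetD tb ((k : Nat) : Int) (0, 0) = tb[k] := by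
      rw [PySem.List.pyGetD_natCast]
      exact List.getD_eq_getElem _ _ (by omega)
    have e2 : PySem.List.pyGetD tb (((k : Nat) : Int) + 1) (0, 0) = tb[k + 1] := by
      have : ((k : Nat) : Int) + 1 = ((k + 1 : Nat) : Int) := by push_cast; ring
      rw [this, PySem.List.pyGetD_natCast]
      exact List.getD_eq_getElem _ _ (by omega)
    have e0 : tb[k]? = some tb[k] := List.getElem?_eq_getElem (by omega)
    simp [e1, e2, e0, List.getElem_zip, List.getElem_tail]

theorem pv_label_empty (g : List Char) : g.isEmpty = true ↔ pvLabel g = "empty" := by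
  unfold pvLabel
  split_ifs with h1 h2 h3 <;> simp_all

theorem pv_label_punct (g : List Char) :
    (!g.isEmpty && pvIsPunctuationOnly g) = true ↔ pvLabel g = "punct" := by
  unfold pvLabel pvIsPunctuationOnly
  split_ifs with h1 h2 h3 <;>
    simp_all [Bool.and_eq_true]

theorem pv_label_space (g : List Char) :
    (!g.isEmpty && PySem.Chars.strIsspace g) = true ↔ pvLabel g = "space" := by
  unfold pvLabel
  split_ifs with h1 h2 h3
  · simp_all
  · -- a nonempty punctuation-only gap is never all-space
    have hne : g ≠ [] := fun he => h1 (by simp [he])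
    obtain ⟨c, hc⟩ := List.exists_mem_of_ne_nil g hne
    have hpc := List.all_eq_true.mp h2 c hc
    constructor
    · intro hs
      simp only [PySem.Chars.strIsspace, Bool.and_eq_true, List.all_eq_true] at hs
      have hsc := hs.2.2 c hc
      simp [hsc] at hpc
    · intro heq
      simp at heq
  · have he : g.isEmpty = false := by simpa using h1
    simp [he, h3]
  · simp [h3]

-- the label set built by B's loop equals {lab} iff every gap gets label lab (nonempty list of gaps)
theorem pv_set_singleton {α β : Type} [DecidableEq β] (l : List α) (f : α → β) (lab : β)
    (hne : l ≠ []) :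
    PySem.Set.equal (l.foldl (fun s a => PySem.Set.add s (f a)) PySem.Set.empty) [lab] = true
      ↔ ∀ a ∈ l, f a = lab := by
  rw [PySem.Set.equal_iff]
  constructor
  · intro h a ha
    have := (h (f a)).mp (by
      rw [PySem.Set.mem_foldl_add]
      exact Or.inr ⟨a, ha, rfl⟩)
    simpa using this
  · intro h x
    rw [PySem.Set.mem_foldl_add]
    obtain ⟨a, ha⟩ := List.exists_mem_of_ne_nil l hne
    constructor
    · rintro (hx | ⟨b, hb, rfl⟩)
      · simp [PySem.Set.empty] at hx
      · simp [h b hb]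
    · intro hx
      exact Or.inr ⟨a, ha, by simp at hx; rw [hx, h a ha]⟩

theorem pv_cond_eq (cs : List Char) (tb : List (Int × Int)) (hlen : 2 ≤ tb.length)
    (P : List Char → Bool) (lab : String)
    (hPL : ∀ g, P g = true ↔ pvLabel g = lab) :
    ((List.range (tb.length - 1)).map (fun (index : Nat) =>
        PySem.List.slice cs
          (some (PySem.List.pyGetD tb (index : Int) (0, 0)).2)
          (some (PySem.List.pyGetD tb ((index : Int) + 1) (0, 0)).1))).all P
      = PySem.Set.equal
          ((tb.zip tb.tail).foldl
            (fun labels p =>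
              PySem.Set.add labels (pvLabel (PySem.List.slice cs (some p.1.2) (some p.2.1))))
            PySem.Set.empty) [lab] := by
  have hne : tb.zip tb.tail ≠ [] := by
    rcases tb with _ | ⟨a, _ | ⟨b, t⟩⟩ <;> simp_all
  rw [pv_gaps_eq]
  rw [Bool.eq_iff_iff,
    pv_set_singleton (tb.zip tb.tail)
      (fun p => pvLabel (PySem.List.slice cs (some p.1.2) (some p.2.1))) lab hne]
  simp only [List.all_eq_true, List.mem_map, forall_exists_index, and_imp]
  constructor
  · intro h p hp
    exact (hPL _).mp (h _ p hp rfl)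
  · rintro h g p hp rfl
    exact (hPL _).mpr (h p hp)

-- ===== VERDICT (by name: the statement is the Claim_ definition above) =====
theorem adjacency_rank_py_spec : Claim_equal_adjacency_rank_py := by
  intro original_text tb _
  unfold Spec_adjacency_rank_py adjacency_rank_py adjacency_rank_py_alt
  by_cases h0 : tb = []
  · simp [h0]
  · simp only [h0, if_false]
    by_cases h1 : tb.length = 1
    · simp [h1]
    · have hlen : 2 ≤ tb.length := by
        have : tb.length ≠ 0 := by simpa using h0
        omega
      simp only [h1, if_false]
      rw [pv_cond_eq original_text.toList tb hlen _ "empty"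
            (by intro g; simpa using pv_label_empty g),
          pv_cond_eq original_text.toList tb hlen _ "punct" pv_label_punct,
          pv_cond_eq original_text.toList tb hlen _ "space" pv_label_space]
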